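-- pv_equiv track=rewrite | github.com/aayush4vedi/newsx | utils.py | belongstoblockchain_finance
-- ===== SOURCE A (Python) =====
-- def belongstoblockchain_finance(s):
--
--     blockchain_finance_tags = [
--         'crypto',
--         'cryptography',
--         'economics',
--         'economy',
--         'financ',
--         'finance',
--         'accounting',
--         'invest',
--         'blockchain',
--         'block-chain',
--         'bitcoin',
--     ]
--     return any(blockchain_finance_tag in ','.join(s) for blockchain_finance_tag in blockchain_finance_tags)
-- ===== SOURCE B (Python) =====
-- def belongstoblockchain_finance(s):
--     tags = [
--         'crypto',
--         'cryptography',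
--         'economics',
--         'economy',
--         'financ',
--         'finance',
--         'accounting',
--         'invest',
--         'blockchain',
--         'block-chain',
--         'bitcoin',
--     ]
--     # Single left-to-right pass over the joined text, simulating an NFA:
--     # 'active' holds the remaining suffix of every tag partially matched so far.
--     active = []
--     for c in ','.join(s):
--         nxt = []
--         for t in active + tags:
--             if t[0] == c:
--                 rest = t[1:]
--                 if not rest:
--                     return True
--                 nxt.append(rest)
--         active = nxt
--     return False
-- ===== Notes on version B (the rewrite author's own statement) =====
-- stated objective: alternative
-- what changed: Replaces A's per-tag substring scan of the whole joined string with a single left-to-right NFA pass over ','.join(s) that carries the set of remaining suffixes of partially matched tags and returns at the first completed match.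
import Mathlib
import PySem

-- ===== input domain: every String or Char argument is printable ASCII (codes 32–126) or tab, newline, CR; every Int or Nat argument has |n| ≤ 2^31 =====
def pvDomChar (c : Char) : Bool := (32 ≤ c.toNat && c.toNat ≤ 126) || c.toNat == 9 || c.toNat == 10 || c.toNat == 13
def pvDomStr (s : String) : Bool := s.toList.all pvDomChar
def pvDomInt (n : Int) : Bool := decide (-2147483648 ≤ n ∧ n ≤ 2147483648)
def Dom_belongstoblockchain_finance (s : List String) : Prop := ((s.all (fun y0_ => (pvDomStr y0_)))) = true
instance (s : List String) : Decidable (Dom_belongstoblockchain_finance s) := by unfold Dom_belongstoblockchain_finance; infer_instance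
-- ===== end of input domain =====

-- B replaces A's per-tag whole-string substring scans with one left-to-right NFA pass over the
-- joined text, carrying the remaining suffixes of partially matched tags — alternative, same cost class.


-- ===== PORT A =====
def belongstoblockchain_finance (s : List String) : Bool :=
  let blockchain_finance_tags : List String :=
    ["crypto", "cryptography", "economics", "economy", "financ", "finance",
     "accounting", "invest", "blockchain", "block-chain", "bitcoin"]
  let joined := PySem.Str.join "," s
  blockchain_finance_tags.any (fun tag => PySem.Str.isIn tag joined)

-- ===== PORT B =====
def pvTags : List (List Char) :=
  ["crypto", "cryptography", "economics", "economy", "financ", "finance",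
   "accounting", "invest", "blockchain", "block-chain", "bitcoin"].map String.toList

-- the inner 'for t in active + tags' loop: 'none' = Python's early 'return True';
-- the '[]' entry case is unreachable in Python (entries are always nonempty), ported as a skip
def pvFeed (c : Char) : List (List Char) → Option (List (List Char))
  | [] => some []
  | t :: ts =>
      match t with
      | [] => pvFeed c ts
      | x :: rest =>
          if x = c then
            if rest = [] then none
            else (pvFeed c ts).map (fun nxt => rest :: nxt)
          else pvFeed c ts

-- the outer 'for c in ','.join(s)' loop with accumulator 'active'
def pvRun : List (List Char) → List Char → Bool
  | _, [] => false
  | active, c :: cs =>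
      match pvFeed c (active ++ pvTags) with
      | none => true
      | some nxt => pvRun nxt cs

def belongstoblockchain_finance_alt (s : List String) : Bool :=
  pvRun [] (PySem.Str.join "," s).toList

-- ===== PRECONDITION & SPEC =====
def Spec_belongstoblockchain_finance (s : List String) (out : Bool) : Prop := out = belongstoblockchain_finance_alt s
instance (s : List String) (out : Bool) : Decidable (Spec_belongstoblockchain_finance s out) := by unfold Spec_belongstoblockchain_finance; infer_instance

-- ===== CLAIM (what is proved, stated in full; the proofs are below) =====
def Claim_equal_belongstoblockchain_finance : Prop := ∀ (s : List String), Dom_belongstoblockchain_finance s → Spec_belongstoblockchain_finance s (belongstoblockchain_finance s)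

-- ===== LEMMAS AND PROOFS =====
theorem pvFeed_eq_cons (c x : Char) (rest : List Char) (ts : List (List Char)) :
    pvFeed c ((x :: rest) :: ts)
      = if x = c then (if rest = [] then none
          else (pvFeed c ts).map (fun nxt => rest :: nxt)) else pvFeed c ts := rfl

theorem pvFeed_eq_nil (c : Char) (ts : List (List Char)) :
    pvFeed c ([] :: ts) = pvFeed c ts := rfl

theorem pvFeed_none_iff (c : Char) (ts : List (List Char)) :
    pvFeed c ts = none ↔ ∃ t ∈ ts, t = [c] := by
  induction ts with
  | nil => simp [pvFeed]
  | cons t ts ih =>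
      cases t with
      | nil => simpa [pvFeed] using ih
      | cons x rest =>
          by_cases hx : x = c
          · by_cases hr : rest = []
            · subst hr
              rw [pvFeed_eq_cons, if_pos hx, if_pos rfl]
              exact iff_of_true rfl ⟨[x], List.mem_cons_self, by rw [hx]⟩
            · rw [pvFeed_eq_cons, if_pos hx, if_neg hr]
              simp only [Option.map_eq_none_iff, ih, List.mem_cons]
              constructor
              · rintro ⟨t, ht, rfl⟩; exact ⟨_, Or.inr ht, rfl⟩
              · rintro ⟨t, ht | ht, rfl⟩
                · injection ht with h1 h2; exact absurd h2.symm hr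
                · exact ⟨_, ht, rfl⟩
          · rw [pvFeed_eq_cons, if_neg hx]
            simp only [ih, List.mem_cons]
            constructor
            · rintro ⟨t, ht, rfl⟩; exact ⟨_, Or.inr ht, rfl⟩
            · rintro ⟨t, ht | ht, rfl⟩
              · injection ht with h1 h2; exact absurd h1.symm hx
              · exact ⟨_, ht, rfl⟩

theorem pvFeed_some_mem (c : Char) (ts : List (List Char)) (nxt : List (List Char))
    (h : pvFeed c ts = some nxt) (r : List Char) :
    r ∈ nxt ↔ ∃ t ∈ ts, t = c :: r ∧ r ≠ [] := by
  induction ts generalizing nxt with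
  | nil => simp [pvFeed] at h; subst h; simp
  | cons t ts ih =>
      cases t with
      | nil =>
          rw [pvFeed_eq_nil] at h
          simp only [List.mem_cons]
          rw [ih nxt h]
          constructor
          · rintro ⟨t, ht, rfl, hr⟩; exact ⟨_, Or.inr ht, rfl, hr⟩
          · rintro ⟨t, ht | ht, rfl, hr⟩
            · cases ht
            · exact ⟨_, ht, rfl, hr⟩
      | cons x rest =>
          by_cases hx : x = c
          · by_cases hrr : rest = []
            · subst hrr; rw [pvFeed_eq_cons, if_pos hx, if_pos rfl] at h; cases h
            · rw [pvFeed_eq_cons, if_pos hx, if_neg hrr] at h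
              cases h' : pvFeed c ts with
              | none => rw [h'] at h; cases h
              | some nxt' =>
                  rw [h'] at h
                  simp only [Option.map_some, Option.some.injEq] at h
                  subst h
                  simp only [List.mem_cons, ih nxt' h']
                  constructor
                  · rintro (rfl | ⟨t, ht, rfl, hr⟩)
                    · exact ⟨x :: r, Or.inl rfl, by rw [hx], hrr⟩
                    · exact ⟨_, Or.inr ht, rfl, hr⟩
                  · rintro ⟨t, ht | ht, rfl, hr⟩
                    · injection ht with h1 h2; exact Or.inl h2
                    · exact Or.inr ⟨_, ht, rfl, hr⟩
          · rw [pvFeed_eq_cons, if_neg hx] at h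
            simp only [List.mem_cons, ih nxt h]
            constructor
            · rintro ⟨t, ht, rfl, hr⟩; exact ⟨_, Or.inr ht, rfl, hr⟩
            · rintro ⟨t, ht | ht, rfl, hr⟩
              · injection ht with h1 h2; exact absurd h1.symm hx
              · exact ⟨_, ht, rfl, hr⟩

theorem pvTags_ne_nil : ∀ t ∈ pvTags, t ≠ [] := by decide

theorem pvRun_iff (active : List (List Char)) (cs : List Char) :
    pvRun active cs = true ↔
      (∃ a ∈ active, a ≠ [] ∧ a <+: cs) ∨ (∃ t ∈ pvTags, t <:+: cs) := by
  induction cs generalizing active with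
  | nil =>
      simp only [pvRun, List.prefix_nil, List.infix_nil]
      constructor
      · intro h; cases h
      · rintro (⟨a, _, hne, rfl⟩ | ⟨t, ht, rfl⟩)
        · exact absurd rfl hne
        · exact absurd rfl (pvTags_ne_nil _ ht)
  | cons c cs ih =>
      rw [show pvRun active (c :: cs)
            = (match pvFeed c (active ++ pvTags) with
               | none => true
               | some nxt => pvRun nxt cs) from rfl]
      cases h : pvFeed c (active ++ pvTags) with
      | none =>
          obtain ⟨t, ht, rfl⟩ := (pvFeed_none_iff _ _).mp h
          refine iff_of_true rfl ?_
          rcases List.mem_append.mp ht with ht | ht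
          · exact Or.inl ⟨[c], ht, by simp, ⟨cs, rfl⟩⟩
          · exact Or.inr ⟨[c], ht, ⟨[], cs, rfl⟩⟩
      | some nxt =>
          rw [ih nxt]
          have hmem := pvFeed_some_mem c (active ++ pvTags) nxt h
          have hne : pvFeed c (active ++ pvTags) ≠ none := by
            intro hn; rw [h] at hn; exact Option.some_ne_none _ hn
          constructor
          · rintro (⟨r, hr, hrne, hpre⟩ | ⟨t, ht, hinf⟩)
            · obtain ⟨t, ht, rfl, _⟩ := (hmem r).mp hr
              rcases List.mem_append.mp ht with ht | ht
              · exact Or.inl ⟨c :: r, ht, by simp,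
                  List.cons_prefix_cons.mpr ⟨rfl, hpre⟩⟩
              · exact Or.inr ⟨c :: r, ht,
                  (List.cons_prefix_cons.mpr ⟨rfl, hpre⟩ :
                    c :: r <+: c :: cs).isInfix⟩
            · exact Or.inr ⟨t, ht, List.infix_cons hinf⟩
          · rintro (⟨a, ha, hane, hpre⟩ | ⟨t, ht, hinf⟩)
            · obtain ⟨x, r, rfl⟩ : ∃ x r, a = x :: r := by
                cases a with
                | nil => exact absurd rfl hane
                | cons x r => exact ⟨x, r, rfl⟩
              obtain ⟨rfl, hpre'⟩ := List.cons_prefix_cons.mp hpre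
              by_cases hrnil : r = []
              · subst hrnil
                exact absurd ((pvFeed_none_iff _ _).mpr
                  ⟨[x], List.mem_append.mpr (Or.inl ha), rfl⟩) hne
              · exact Or.inl ⟨r, (hmem r).mpr
                  ⟨x :: r, List.mem_append.mpr (Or.inl ha), rfl, hrnil⟩, hrnil, hpre'⟩
            · rcases (List.infix_cons_iff).mp hinf with hpre | hinf'
              · obtain ⟨x, r, rfl⟩ : ∃ x r, t = x :: r := by
                  cases t with
                  | nil => exact absurd rfl (pvTags_ne_nil _ ht)
                  | cons x r => exact ⟨x, r, rfl⟩
                obtain ⟨rfl, hpre'⟩ := List.cons_prefix_cons.mp hpre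
                by_cases hrnil : r = []
                · subst hrnil
                  exact absurd ((pvFeed_none_iff _ _).mpr
                    ⟨[x], List.mem_append.mpr (Or.inr ht), rfl⟩) hne
                · exact Or.inl ⟨r, (hmem r).mpr
                    ⟨x :: r, List.mem_append.mpr (Or.inr ht), rfl, hrnil⟩, hrnil, hpre'⟩
              · exact Or.inr ⟨t, ht, hinf'⟩

-- ===== VERDICT (by name: the statement is the Claim_ definition above) =====
theorem belongstoblockchain_finance_spec : Claim_equal_belongstoblockchain_finance := by
  intro s _
  unfold Spec_belongstoblockchain_finance belongstoblockchain_finance belongstoblockchain_finance_alt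
  rw [Bool.eq_iff_iff, pvRun_iff]
  simp only [List.any_eq_true, PySem.Str.isIn_iff_infix]
  constructor
  · rintro ⟨tag, htag, hinf⟩
    exact Or.inr ⟨tag.toList, List.mem_map.mpr ⟨tag, htag, rfl⟩, hinf⟩
  · rintro (⟨a, ha, _⟩ | ⟨t, ht, hinf⟩)
    · simp at ha
    · obtain ⟨tag, htag, rfl⟩ := List.mem_map.mp ht
      exact ⟨tag, htag, hinf⟩
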